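-- pv_equiv track=rewrite | github.com/fabien25/3I005 | TD_TME/Projet_1/projet1.py | predit_mail
-- ===== SOURCE A (Python) =====
-- def longueur(mail):
--     cpt=0
--     for i in mail:
--         if (i==" "):
--             cpt=cpt+1
--     return cpt+1
--
-- def predit_mail (emails,modele):
--     nb_mots=longueur(emails)
--     cpt=0
--     for i in modele[0]:
--         if (i>nb_mots):
--             #print ("nbmot",nb_mots)
--             #print ("i",i)
--             break
--         cpt=cpt+1
--     return modele[1][cpt-1]
-- ===== SOURCE B (Python) =====
-- def predit_mail(emails, modele):
--     # number of words = number of spaces + 1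
--     nb_mots = emails.count(" ") + 1
--     seuils = modele[0]
--     # binary search (bisect_right by hand): first index whose threshold exceeds nb_mots
--     lo, hi = 0, len(seuils)
--     while lo < hi:
--         mid = (lo + hi) // 2
--         if seuils[mid] <= nb_mots:
--             lo = mid + 1
--         else:
--             hi = mid
--     return modele[1][lo - 1]
-- ===== Notes on version B (the rewrite author's own statement) =====
-- stated objective: faster
-- what changed: A scans modele[0] linearly to count leading thresholds <= the word count; B finds that position by binary search (hand-rolled bisect_right) on modele[0] (hence Pre_ requires modele[0] sorted ascending) and gets the word count via str.count instead of a character loop.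
-- outside the precondition, e.g. on predit_mail('a b', [[5, 1], [10, 20, 30]]): A returns 30, B returns 20
import Mathlib
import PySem

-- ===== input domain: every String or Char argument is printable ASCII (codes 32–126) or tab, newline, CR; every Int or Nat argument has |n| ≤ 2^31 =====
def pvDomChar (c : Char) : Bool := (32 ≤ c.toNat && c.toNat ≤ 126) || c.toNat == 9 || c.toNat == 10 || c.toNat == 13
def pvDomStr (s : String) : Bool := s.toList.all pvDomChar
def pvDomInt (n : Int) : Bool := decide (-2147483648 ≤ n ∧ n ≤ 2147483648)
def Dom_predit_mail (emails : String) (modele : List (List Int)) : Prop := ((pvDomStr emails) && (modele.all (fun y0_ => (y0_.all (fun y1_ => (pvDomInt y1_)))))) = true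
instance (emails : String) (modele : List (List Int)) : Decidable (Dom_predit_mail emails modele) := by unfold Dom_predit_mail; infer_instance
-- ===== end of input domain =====

-- B replaces A's linear scan over modele[0] by a binary search (bisect_right), valid when modele[0] is sorted ascending (required by Pre_).


-- ===== PORT A =====
-- longueur(mail): count spaces, + 1
def pvLongueur (mail : List Char) : Int :=
  (mail.foldl (fun cpt i => if i = ' ' then cpt + 1 else cpt) 0) + 1

-- the 'for i in modele[0]: if i > nb: break; cpt += 1' loop
def pvLoopA (nb : Int) : List Int → Int → Int
  | [], cpt => cpt
  | i :: t, cpt => if i > nb then cpt else pvLoopA nb t (cpt + 1)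

def predit_mail (emails : String) (modele : List (List Int)) : Int :=
  let nb_mots := pvLongueur emails.toList
  let row0 := (PySem.List.pyGet? modele 0).getD []
  let cpt := pvLoopA nb_mots row0 0
  (PySem.List.pyGet? ((PySem.List.pyGet? modele 1).getD []) (cpt - 1)).getD 0

-- ===== PORT B =====
-- the 'while lo < hi' bisect_right loop of Source B
def pvBsearch (row : List Int) (nb : Int) (lo hi : Nat) : Nat :=
  if _h : lo < hi then
    let mid := (lo + hi) / 2
    if (PySem.List.pyGet? row (mid : Int)).getD 0 ≤ nb then
      pvBsearch row nb (mid + 1) hi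
    else
      pvBsearch row nb lo mid
  else lo
termination_by hi - lo
decreasing_by · omega
              · omega

def predit_mail_alt (emails : String) (modele : List (List Int)) : Int :=
  let nb_mots : Int := (PySem.Str.count emails " " : Int) + 1
  let seuils := (PySem.List.pyGet? modele 0).getD []
  let lo := pvBsearch seuils nb_mots 0 seuils.length
  (PySem.List.pyGet? ((PySem.List.pyGet? modele 1).getD []) ((lo : Int) - 1)).getD 0

-- ===== PRECONDITION & SPEC =====
-- Pre_ asks for the inputs on which A returns (two rows present, and the looked-up index
-- cpt - 1 — cpt = how many thresholds of modele[0] are ≤ the word count — a valid Python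
-- index into modele[1], negative -1 included) AND for modele[0] partitioned around the
-- word count (every threshold ≤ it precedes every threshold > it, as on a sorted model):
-- B's binary search is only equivalent to A's linear scan on such rows, so rows that are
-- unsorted around the word count (on which A still returns) are excluded.
def Pre_predit_mail (emails : String) (modele : List (List Int)) : Prop :=
  2 ≤ modele.length ∧
    (modele.getD 0 []).Pairwise
      (fun a b => b ≤ (emails.toList.count ' ' : Int) + 1 → a ≤ (emails.toList.count ' ' : Int) + 1) ∧
    PySem.Raise.InRange (modele.getD 1 []).length
      (((modele.getD 0 []).countP (fun i => i ≤ (emails.toList.count ' ' : Int) + 1) : Int) - 1)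
instance (emails : String) (modele : List (List Int)) : Decidable (Pre_predit_mail emails modele) := by
  unfold Pre_predit_mail; infer_instance

def pvWitness_predit_mail : String × List (List Int) := ("a b c", [[1, 3, 7], [10, 20, 30]])

def Spec_predit_mail (emails : String) (modele : List (List Int)) (out : Int) : Prop := out = predit_mail_alt emails modele
instance (emails : String) (modele : List (List Int)) (out : Int) : Decidable (Spec_predit_mail emails modele out) := by unfold Spec_predit_mail; infer_instance

-- ===== CLAIM (what is proved, stated in full; the proofs are below) =====
def Claim_equal_predit_mail : Prop := ∀ (emails : String) (modele : List (List Int)), Dom_predit_mail emails modele → Pre_predit_mail emails modele → Spec_predit_mail emails modele (predit_mail emails modele)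

-- ===== LEMMAS AND PROOFS =====

-- single-character substring count = character count
theorem pv_count_go_single (c : Char) : ∀ (l : List Char) (fuel acc : Nat), l.length ≤ fuel →
    PySem.Chars.count.go [c] fuel l acc = acc + l.count c := by
  intro l
  induction l with
  | nil => intro fuel acc _; cases fuel <;> simp [PySem.Chars.count.go]
  | cons h t ih =>
    intro fuel acc hf
    cases fuel with
    | zero => simp at hf
    | succ f =>
      rw [PySem.Chars.count.go]
      by_cases hc : c = h
      · subst hc
        simp only [List.isPrefixOf, and_true, beq_self_eq_true, List.length_cons,
          List.drop_succ_cons, List.length_nil, List.drop_zero, Bool.and_self,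
          eq_self_iff_true, if_true]
        rw [ih f (acc + 1) (by simp only [List.length_cons] at hf; omega)]
        simp [List.count_cons]
        omega
      · have hpre : ([c].isPrefixOf (h :: t)) = false := by
          simp only [List.isPrefixOf, Bool.and_eq_false_iff]
          exact Or.inl (by simp only [beq_eq_false_iff_ne, ne_eq]; exact fun hh => hc hh)
        simp only [hpre, if_false]
        rw [ih f acc (by simp only [List.length_cons] at hf; omega)]
        simp [List.count_cons, hc]
        exact fun hh => hc hh.symm

theorem pv_count_single (c : Char) (l : List Char) :
    PySem.Chars.count l [c] = l.count c := by
  unfold PySem.Chars.count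
  simp [pv_count_go_single c l l.length 0 le_rfl]

-- A's word count = B's word count
theorem pv_nb_eq (emails : String) :
    (PySem.Str.count emails " " : Int) + 1 = pvLongueur emails.toList := by
  unfold pvLongueur
  rw [PySem.Str.count_eq]
  have h : (" " : String).toList = [' '] := rfl
  rw [h, pv_count_single]
  rw [PySem.List.foldl_ite_add_one (fun i => i = ' ') emails.toList 0]
  have hcnt : emails.toList.count ' ' = emails.toList.countP (fun x => decide (x = ' ')) := by
    rw [List.count_eq_countP]
    exact List.countP_congr (fun x _ => by simp)
  rw [hcnt]
  omega

-- A's loop counts the leading elements ≤ nb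
theorem pv_loopA_eq (nb : Int) : ∀ (xs : List Int) (cpt : Int),
    pvLoopA nb xs cpt = cpt + ((xs.takeWhile (fun i => decide (i ≤ nb))).length : Int) := by
  intro xs
  induction xs with
  | nil => intro cpt; simp [pvLoopA]
  | cons i t ih =>
    intro cpt
    by_cases h : i > nb
    · simp [pvLoopA, h, List.takeWhile_cons, show ¬ (i ≤ nb) by omega]
    · have hle : i ≤ nb := by omega
      simp only [pvLoopA, if_neg h, List.takeWhile_cons, decide_eq_true hle]
      rw [ih (cpt + 1)]
      simp
      omega

-- takeWhile length from a split point
theorem pv_takeWhile_len (p : Int → Bool) : ∀ (l : List Int) (r : Nat), r ≤ l.length →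
    (∀ k, k < r → p (l.getD k 0) = true) → (∀ h : r < l.length, p (l.getD r 0) = false) →
    (l.takeWhile p).length = r := by
  intro l
  induction l with
  | nil =>
    intro r h _ _
    simp only [List.length_nil] at h
    simp only [List.takeWhile_nil, List.length_nil]
    omega
  | cons x t ih =>
    intro r hr hbelow habove
    cases r with
    | zero =>
      have hx : p x = false := by simpa [List.getD] using habove (by simp)
      simp [List.takeWhile_cons, hx]
    | succ r' =>
      have hx : p x = true := by simpa using hbelow 0 (Nat.succ_pos _)
      simp only [List.takeWhile_cons, hx, if_true, List.length_cons]
      rw [ih r' (by simpa using hr)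
        (fun k hk => by simpa using hbelow (k + 1) (by omega))
        (fun h => by simpa using habove (by simpa using h))]

-- binary-search correctness on a row partitioned around nb
theorem pv_bsearch_eq (row : List Int) (nb : Int)
    (hpart : ∀ i j, i ≤ j → j < row.length → row.getD j 0 ≤ nb → row.getD i 0 ≤ nb) :
    ∀ (lo hi : Nat), lo ≤ hi → hi ≤ row.length →
    (∀ k, k < lo → row.getD k 0 ≤ nb) → (∀ k, hi ≤ k → k < row.length → nb < row.getD k 0) →
    pvBsearch row nb lo hi = (row.takeWhile (fun i => decide (i ≤ nb))).length := by
  intro lo hi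
  induction lo, hi using pvBsearch.induct row nb with
  | case1 lo hi h mid hcond ih =>
    intro hlohi hhi hbelow habove
    have hmide : mid = (lo + hi) / 2 := rfl
    have hmid : row.getD mid 0 ≤ nb := by
      simpa [PySem.List.pyGet?_natCast, List.getD] using hcond
    have hmidlt : mid < row.length := by omega
    rw [pvBsearch, dif_pos h]
    simp only [← hmide, hcond, if_true]
    exact ih (by omega) hhi
      (fun k hk => hpart k mid (by omega) hmidlt hmid) habove
  | case2 lo hi h mid hcond ih =>
    intro hlohi hhi hbelow habove
    have hmide : mid = (lo + hi) / 2 := rfl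
    have hmid : ¬ row.getD mid 0 ≤ nb := by
      simpa [PySem.List.pyGet?_natCast, List.getD] using hcond
    rw [pvBsearch, dif_pos h]
    simp only [← hmide, hcond, if_false]
    exact ih (by omega) (by omega) hbelow
      (fun k hk hklen => lt_of_not_ge (fun hle => hmid (hpart mid k hk hklen hle)))
  | case3 lo hi h =>
    intro hlohi hhi hbelow habove
    have hlo : lo = hi := by omega
    subst hlo
    rw [pvBsearch, dif_neg h]
    exact (pv_takeWhile_len _ row lo (by omega)
      (fun k hk => decide_eq_true (hbelow k hk))
      (fun hlt => decide_eq_false (not_le.mpr (habove lo le_rfl hlt)))).symm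

-- ===== VERDICT (by name: the statement is the Claim_ definition above) =====
theorem predit_mail_spec : Claim_equal_predit_mail := by
  intro emails modele _hdom hpre
  obtain ⟨hlen, hpair, _hrange⟩ := hpre
  unfold Spec_predit_mail predit_mail predit_mail_alt
  cases modele with
  | nil => simp at hlen
  | cons r0 tl =>
    cases tl with
    | nil => simp at hlen
    | cons r1 rest =>
      simp only [List.getD_cons_zero] at hpair
      have h0 : PySem.List.pyGet? (r0 :: r1 :: rest) (0 : Int) = some r0 := by
        have hpos : (0 : Int) ≤ (rest.length : Int) + 1 := by positivity
        simp [PySem.List.pyGet?, PySem.List.pyIdx?, hpos]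
      rw [h0]
      simp only [Option.getD_some]
      rw [← pv_nb_eq emails]
      set nb : Int := (PySem.Str.count emails " " : Int) + 1 with hnbdef
      have hsp : (" " : String).toList = [' '] := rfl
      have hnbe : nb = (emails.toList.count ' ' : Int) + 1 := by
        rw [hnbdef, PySem.Str.count_eq, hsp, pv_count_single]
      have hpart : ∀ i j, i ≤ j → j < r0.length → r0.getD j 0 ≤ nb → r0.getD i 0 ≤ nb := by
        intro i j hij hj hjle
        rcases Nat.eq_or_lt_of_le hij with rfl | hlt
        · exact hjle
        · have := (List.pairwise_iff_getElem.mp hpair) i j (by omega) hj hlt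
          rw [← hnbe] at this
          rw [List.getD_eq_getElem r0 0 hj] at hjle
          rw [List.getD_eq_getElem r0 0 (by omega : i < r0.length)]
          exact this hjle
      rw [pv_loopA_eq nb r0 0,
          pv_bsearch_eq r0 nb hpart 0 r0.length (Nat.zero_le _) le_rfl
            (by omega) (by omega)]
      simp
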